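-- pv_equiv track=rewrite | github.com/Gregor-Mendel-Institute/bookend | bookend/core/fasta_softbridges.py | generate_softbridges
-- ===== SOURCE A (Python) =====
-- def generate_softbridges(genome_dict, maxlen):
--     """From a genome dict, writes a generator
--     that yields one BED12 line for each start/stop
--     of a softmasked region of the FASTA file,
--     demarcated by lowercase letters.
--     """
--     for chrom in sorted(list(genome_dict.keys())):
--         soft_toggle = False
--         current_pos = 0
--         start_pos = 0
--         end_pos = 0
--         for lowercase in [i.islower() for i in genome_dict[chrom]]:
--             if lowercase:
--                 if not soft_toggle:
--                     # Start a softbridge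
--                     soft_toggle = True
--                     start_pos = current_pos
--             else:
--                 if soft_toggle:
--                     # End a softbridge
--                     soft_toggle = False
--                     end_pos = current_pos
--                     out_string = '{}\t{}\t{}\t{}\t{}\t{}\t{}\t{}\t{}\t{}\t{}\t{}\t{}\t{}\t{}'.format(
--                         chrom,start_pos,end_pos,
--                         'UU',0,'.',0,0,'204,204,180',1,end_pos-start_pos,0,
--                         0.01,'softbridge','.'
--                     )
--                     yield out_string
--
--             current_pos += 1
-- ===== SOURCE B (Python) =====
-- def generate_softbridges(genome_dict, maxlen):
--     """Run-length decomposition instead of a per-character toggle state machine: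
--     collapse each sequence into consecutive (is_lower, length) runs with a
--     two-pointer scan, then walk the runs with a running offset and emit one
--     BED12 line per lowercase run that is followed by another run (a lowercase
--     run at the very end of the sequence is never closed, hence not emitted)."""
--     for chrom in sorted(genome_dict):
--         seq = genome_dict[chrom]
--         n = len(seq)
--         runs = []
--         i = 0
--         while i < n:
--             low = seq[i].islower()
--             j = i + 1
--             while j < n and seq[j].islower() == low:
--                 j += 1
--             runs.append((low, j - i))
--             i = j
--         pos = 0
--         for k, (low, length) in enumerate(runs):
--             start, pos = pos, pos + length
--             if low and k + 1 < len(runs):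
--                 yield '{}\t{}\t{}\t{}\t{}\t{}\t{}\t{}\t{}\t{}\t{}\t{}\t{}\t{}\t{}'.format(
--                     chrom, start, pos, 'UU', 0, '.', 0, 0, '204,204,180',
--                     1, pos - start, 0, 0.01, 'softbridge', '.')
-- ===== Notes on version B (the rewrite author's own statement) =====
-- stated objective: alternative
-- what changed: Replaces A's per-character soft_toggle state machine by a run-length decomposition: a two-pointer scan collapses each sequence into (is_lower, length) runs, then a walk over the runs with a running offset emits one BED12 line per lowercase run that is followed by another run.
import Mathlib
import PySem

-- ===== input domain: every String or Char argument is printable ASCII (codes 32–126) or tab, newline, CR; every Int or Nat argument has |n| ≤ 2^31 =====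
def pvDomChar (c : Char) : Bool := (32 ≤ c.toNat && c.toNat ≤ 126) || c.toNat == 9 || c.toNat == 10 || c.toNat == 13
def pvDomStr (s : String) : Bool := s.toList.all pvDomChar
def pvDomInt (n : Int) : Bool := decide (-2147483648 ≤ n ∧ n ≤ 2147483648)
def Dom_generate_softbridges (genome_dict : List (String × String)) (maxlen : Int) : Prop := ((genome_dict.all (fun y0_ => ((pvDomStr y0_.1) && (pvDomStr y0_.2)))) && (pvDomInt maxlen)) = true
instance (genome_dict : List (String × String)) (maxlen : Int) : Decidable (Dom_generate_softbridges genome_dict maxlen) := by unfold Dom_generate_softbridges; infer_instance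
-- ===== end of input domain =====

-- B replaces A's per-character toggle state machine by a run-length decomposition
-- (two-pointer scan into (is_lower, length) runs, then a walk over the runs);
-- objective: alternative decomposition, same output.

-- str.islower() for a one-character string; exact on the printable-ASCII/tab/NL/CR domain (Dom)
def pvIsLower (c : Char) : Bool := 'a' ≤ c && c ≤ 'z'

-- the shared BED12 format string of both Pythons ('{}\t…'.format(chrom, start, end, 'UU', 0, …))
def pvFmt (chrom : String) (start_pos end_pos : Int) : String :=
  chrom ++ "\t" ++ PySem.Int.toStr start_pos ++ "\t" ++ PySem.Int.toStr end_pos ++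
  "\tUU\t0\t.\t0\t0\t204,204,180\t1\t" ++ PySem.Int.toStr (end_pos - start_pos) ++
  "\t0\t0.01\tsoftbridge\t."

-- ===== PORT A =====
-- A's inner loop: for lowercase in [i.islower() for i in genome_dict[chrom]]: …
def pvAloop (chrom : String) : List Char → Bool → Int → Int → Int → List String
  | [], _, _, _, _ => []
  | c :: cs, soft_toggle, current_pos, start_pos, end_pos =>
    if pvIsLower c then
      if !soft_toggle then
        -- start a softbridge
        pvAloop chrom cs true (current_pos + 1) current_pos end_pos
      else
        pvAloop chrom cs true (current_pos + 1) start_pos end_pos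
    else
      if soft_toggle then
        -- end a softbridge, yield
        pvFmt chrom start_pos current_pos ::
          pvAloop chrom cs false (current_pos + 1) start_pos current_pos
      else
        pvAloop chrom cs false (current_pos + 1) start_pos end_pos

def generate_softbridges (genome_dict : List (String × String)) (maxlen : Int) : List String :=
  (PySem.List.sorted (PySem.Dict.keys (PySem.Dict.ofList genome_dict)) (fun x => x) false).flatMap
    (fun chrom =>
      pvAloop chrom (PySem.Dict.getD (PySem.Dict.ofList genome_dict) chrom "").toList false 0 0 0)

-- ===== PORT B =====
-- the two-pointer run scanner: inner 'while j < n and seq[j].islower() == low: j += 1'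
-- is the takeWhile/dropWhile split of the tail at the first differently-cased character
def pvRuns : List Char → List (Bool × Int)
  | [] => []
  | c :: cs =>
    (pvIsLower c, 1 + (cs.takeWhile (fun x => pvIsLower x == pvIsLower c)).length) ::
      pvRuns (cs.dropWhile (fun x => pvIsLower x == pvIsLower c))
  termination_by cs => cs.length
  decreasing_by
    simp only [List.length_cons]
    exact Nat.lt_succ_of_le (List.length_dropWhile_le _ _)

-- B's emit loop: for k, (low, length) in enumerate(runs): …  (n = len(runs))
def pvBloop (chrom : String) (n : Int) : List (Bool × Int) → Int → Int → List String
  | [], _, _ => []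
  | (low, length) :: rest, k, pos =>
    (if low && k + 1 < n then [pvFmt chrom pos (pos + length)] else []) ++
      pvBloop chrom n rest (k + 1) (pos + length)

def generate_softbridges_alt (genome_dict : List (String × String)) (maxlen : Int) : List String :=
  (PySem.List.sorted (PySem.Dict.keys (PySem.Dict.ofList genome_dict)) (fun x => x) false).flatMap
    (fun chrom =>
      let runs := pvRuns (PySem.Dict.getD (PySem.Dict.ofList genome_dict) chrom "").toList
      pvBloop chrom runs.length runs 0 0)

-- ===== PRECONDITION & SPEC =====
def Spec_generate_softbridges (genome_dict : List (String × String)) (maxlen : Int) (out : List String) : Prop := out = generate_softbridges_alt genome_dict maxlen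
instance (genome_dict : List (String × String)) (maxlen : Int) (out : List String) : Decidable (Spec_generate_softbridges genome_dict maxlen out) := by unfold Spec_generate_softbridges; infer_instance

-- ===== CLAIM (what is proved, stated in full; the proofs are below) =====
def Claim_equal_generate_softbridges : Prop := ∀ (genome_dict : List (String × String)) (maxlen : Int), Dom_generate_softbridges genome_dict maxlen → Spec_generate_softbridges genome_dict maxlen (generate_softbridges genome_dict maxlen)

-- ===== LEMMAS AND PROOFS =====

-- B's emit loop with the index test 'k + 1 < len(runs)' equals the structural
-- 'tail nonempty' version, whenever n is the true remaining count k + rs.length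
def pvBloopS (chrom : String) : List (Bool × Int) → Int → List String
  | [], _ => []
  | (low, length) :: rest, pos =>
    (if low && !rest.isEmpty then [pvFmt chrom pos (pos + length)] else []) ++
      pvBloopS chrom rest (pos + length)

theorem pvBloop_eq_S (chrom : String) (rs : List (Bool × Int)) :
    ∀ (k pos : Int), pvBloop chrom (k + rs.length) rs k pos = pvBloopS chrom rs pos := by
  induction rs with
  | nil => intro k pos; rfl
  | cons hd tl ih =>
    intro k pos
    obtain ⟨low, length⟩ := hd
    simp only [pvBloop, pvBloopS]
    have hn : k + ((low, length) :: tl).length = (k + 1) + tl.length := by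
      simp only [List.length_cons]; push_cast; ring
    rw [hn, ih (k + 1) (pos + length)]
    congr 1
    by_cases hlow : low <;> cases tl <;> simp [hlow] <;> omega

-- a mid-run continuation of A's loop: toggle is on, the bridge started at s
def pvBmid (chrom : String) (s : Int) : List (Bool × Int) → Int → List String
  | [], _ => []
  | (true, k) :: rest, cur =>
    (if !rest.isEmpty then [pvFmt chrom s (cur + k)] else []) ++ pvBloopS chrom rest (cur + k)
  | (false, k) :: rest, cur => pvFmt chrom s cur :: pvBloopS chrom ((false, k) :: rest) cur

-- A's loop over a uniform block: all-lowercase with the toggle on just advances current_pos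
theorem pvAloop_lower_block (chrom : String) (seg : List Char) (h : ∀ x ∈ seg, pvIsLower x = true) :
    ∀ (rest : List Char) (cur s e : Int),
      pvAloop chrom (seg ++ rest) true cur s e = pvAloop chrom rest true (cur + seg.length) s e := by
  induction seg with
  | nil => intro rest cur s e; simp
  | cons c cs ih =>
    intro rest cur s e
    have hc : pvIsLower c = true := h c (by simp)
    simp only [List.cons_append, pvAloop, hc]
    simp only [Bool.not_true, Bool.false_eq_true, if_false, if_true]
    rw [ih (fun x hx => h x (by simp [hx])) rest (cur + 1) s e]
    congr 1
    simp only [List.length_cons]; push_cast; ring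

-- all-uppercase with the toggle off also just advances current_pos
theorem pvAloop_upper_block (chrom : String) (seg : List Char) (h : ∀ x ∈ seg, pvIsLower x = false) :
    ∀ (rest : List Char) (cur s e : Int),
      pvAloop chrom (seg ++ rest) false cur s e = pvAloop chrom rest false (cur + seg.length) s e := by
  induction seg with
  | nil => intro rest cur s e; simp
  | cons c cs ih =>
    intro rest cur s e
    have hc : pvIsLower c = false := h c (by simp)
    simp only [List.cons_append, pvAloop, hc, Bool.false_eq_true, if_false]
    rw [ih (fun x hx => h x (by simp [hx])) rest (cur + 1) s e]
    congr 1
    simp only [List.length_cons]; push_cast; ring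

-- the element dropWhile stops at fails the predicate
theorem pvDropWhile_head (p : Char → Bool) : ∀ (l : List Char) (d : Char) (ds : List Char),
    l.dropWhile p = d :: ds → p d = false := by
  intro l
  induction l with
  | nil => intro d ds h; simp [List.dropWhile] at h
  | cons x xs ih =>
    intro d ds h
    by_cases hx : p x = true
    · rw [List.dropWhile_cons_of_pos hx] at h; exact ih d ds h
    · rw [List.dropWhile_cons_of_neg hx] at h
      cases h; simpa using hx

-- everything in a takeWhile block satisfies the predicate (specialised)
theorem pvTakeWhile_all (c : Char) (b : Bool) (cs' : List Char) :
    ∀ x ∈ cs'.takeWhile (fun x => pvIsLower x == b), pvIsLower x = b := by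
  intro x hx
  simpa using List.mem_takeWhile_imp hx

-- the four one-run step lemmas for A's loop
theorem pvStep1 (chrom : String) (c : Char) (cs' : List Char) (cur s e : Int)
    (hc : pvIsLower c = true) :
    pvAloop chrom (c :: cs') false cur s e
      = pvAloop chrom (cs'.dropWhile (fun x => pvIsLower x == true)) true
          (cur + 1 + (cs'.takeWhile (fun x => pvIsLower x == true)).length) cur e := by
  conv_lhs => rw [show cs' = cs'.takeWhile (fun x => pvIsLower x == true)
      ++ cs'.dropWhile (fun x => pvIsLower x == true) from (List.takeWhile_append_dropWhile).symm]
  simp only [pvAloop, hc]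
  simp only [Bool.not_false, if_true, Bool.false_eq_true, if_false]
  rw [pvAloop_lower_block chrom _ (fun x hx => pvTakeWhile_all c true cs' x hx)]

theorem pvStep2 (chrom : String) (c : Char) (cs' : List Char) (cur s e : Int)
    (hc : pvIsLower c = true) :
    pvAloop chrom (c :: cs') true cur s e
      = pvAloop chrom (cs'.dropWhile (fun x => pvIsLower x == true)) true
          (cur + 1 + (cs'.takeWhile (fun x => pvIsLower x == true)).length) s e := by
  conv_lhs => rw [show cs' = cs'.takeWhile (fun x => pvIsLower x == true)
      ++ cs'.dropWhile (fun x => pvIsLower x == true) from (List.takeWhile_append_dropWhile).symm]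
  simp only [pvAloop, hc]
  simp only [Bool.not_true, Bool.false_eq_true, if_false, if_true]
  rw [pvAloop_lower_block chrom _ (fun x hx => pvTakeWhile_all c true cs' x hx)]

theorem pvStep3 (chrom : String) (c : Char) (cs' : List Char) (cur s e : Int)
    (hc : pvIsLower c = false) :
    pvAloop chrom (c :: cs') false cur s e
      = pvAloop chrom (cs'.dropWhile (fun x => pvIsLower x == false)) false
          (cur + 1 + (cs'.takeWhile (fun x => pvIsLower x == false)).length) s e := by
  conv_lhs => rw [show cs' = cs'.takeWhile (fun x => pvIsLower x == false)
      ++ cs'.dropWhile (fun x => pvIsLower x == false) from (List.takeWhile_append_dropWhile).symm]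
  simp only [pvAloop, hc]
  simp only [Bool.false_eq_true, if_false]
  rw [pvAloop_upper_block chrom _ (fun x hx => pvTakeWhile_all c false cs' x hx)]

theorem pvStep4 (chrom : String) (c : Char) (cs' : List Char) (cur s e : Int)
    (hc : pvIsLower c = false) :
    pvAloop chrom (c :: cs') true cur s e
      = pvFmt chrom s cur :: pvAloop chrom (cs'.dropWhile (fun x => pvIsLower x == false)) false
          (cur + 1 + (cs'.takeWhile (fun x => pvIsLower x == false)).length) s cur := by
  conv_lhs => rw [show cs' = cs'.takeWhile (fun x => pvIsLower x == false)
      ++ cs'.dropWhile (fun x => pvIsLower x == false) from (List.takeWhile_append_dropWhile).symm]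
  simp only [pvAloop, hc]
  simp only [Bool.false_eq_true, if_false, if_true]
  rw [pvAloop_upper_block chrom _ (fun x hx => pvTakeWhile_all c false cs' x hx)]

-- MAIN: A's state machine equals B's run walk, both from a fresh and a mid-run state
theorem pvMain (n : Nat) : ∀ (cs : List Char), cs.length ≤ n → ∀ (chrom : String) (cur s e : Int),
    pvAloop chrom cs false cur s e = pvBloopS chrom (pvRuns cs) cur ∧
    pvAloop chrom cs true cur s e = pvBmid chrom s (pvRuns cs) cur := by
  induction n with
  | zero =>
    intro cs hlen chrom cur s e
    have : cs = [] := List.length_eq_zero_iff.mp (Nat.le_zero.mp hlen)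
    subst this
    constructor <;> simp [pvAloop, pvRuns, pvBloopS, pvBmid]
  | succ n ih =>
    intro cs hlen chrom cur s e
    match cs with
    | [] => constructor <;> simp [pvAloop, pvRuns, pvBloopS, pvBmid]
    | c :: cs' =>
      cases hc : pvIsLower c with
      | true =>
        have hrunseq : pvRuns (c :: cs')
            = (true, 1 + ((cs'.takeWhile (fun x => pvIsLower x == true)).length : Int))
              :: pvRuns (cs'.dropWhile (fun x => pvIsLower x == true)) := by
          rw [pvRuns, hc]
        have hrlen : (cs'.dropWhile (fun x => pvIsLower x == true)).length ≤ n := by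
          have h1 := List.length_dropWhile_le (fun x => pvIsLower x == true) cs'
          have h2 : cs'.length + 1 ≤ n + 1 := by simpa using hlen
          omega
        have ihrest := ih (cs'.dropWhile (fun x => pvIsLower x == true)) hrlen
        have harith : cur + (1 + ((cs'.takeWhile (fun x => pvIsLower x == true)).length : Int))
            = cur + 1 + (cs'.takeWhile (fun x => pvIsLower x == true)).length := by ring
        have hcases : ∀ (s0 : Int),
            pvBmid chrom s0 (pvRuns (cs'.dropWhile (fun x => pvIsLower x == true)))
                (cur + 1 + (cs'.takeWhile (fun x => pvIsLower x == true)).length)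
            = (if !(pvRuns (cs'.dropWhile (fun x => pvIsLower x == true))).isEmpty then
                [pvFmt chrom s0 (cur + 1 + (cs'.takeWhile (fun x => pvIsLower x == true)).length)] else [])
              ++ pvBloopS chrom (pvRuns (cs'.dropWhile (fun x => pvIsLower x == true)))
                  (cur + 1 + (cs'.takeWhile (fun x => pvIsLower x == true)).length) := by
          intro s0
          cases hr : pvRuns (cs'.dropWhile (fun x => pvIsLower x == true)) with
          | nil => simp [pvBmid, pvBloopS]
          | cons p ps =>
            have hrne : cs'.dropWhile (fun x => pvIsLower x == true) ≠ [] := by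
              intro hnil; rw [hnil] at hr; simp [pvRuns] at hr
            obtain ⟨d, ds, hd⟩ := List.exists_cons_of_ne_nil hrne
            have hdl : pvIsLower d = false := by
              have := pvDropWhile_head (fun x => pvIsLower x == true) cs' d ds hd
              simpa using this
            have hhead : pvRuns (cs'.dropWhile (fun x => pvIsLower x == true))
                = (false, 1 + ((ds.takeWhile (fun x => pvIsLower x == false)).length : Int))
                  :: pvRuns (ds.dropWhile (fun x => pvIsLower x == false)) := by
              rw [hd, pvRuns, hdl]
            have hpe := hr.symm.trans hhead
            injection hpe with hp hps
            subst hp; subst hps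
            simp [pvBmid, pvBloopS]
        constructor
        · rw [pvStep1 chrom c cs' cur s e hc, (ihrest chrom _ cur e).2, hrunseq]
          rw [pvBloopS, harith]
          exact hcases cur
        · rw [pvStep2 chrom c cs' cur s e hc, (ihrest chrom _ s e).2, hrunseq]
          rw [pvBmid, harith]
          exact hcases s
      | false =>
        have hrunseq : pvRuns (c :: cs')
            = (false, 1 + ((cs'.takeWhile (fun x => pvIsLower x == false)).length : Int))
              :: pvRuns (cs'.dropWhile (fun x => pvIsLower x == false)) := by
          rw [pvRuns, hc]
        have hrlen : (cs'.dropWhile (fun x => pvIsLower x == false)).length ≤ n := by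
          have h1 := List.length_dropWhile_le (fun x => pvIsLower x == false) cs'
          have h2 : cs'.length + 1 ≤ n + 1 := by simpa using hlen
          omega
        have ihrest := ih (cs'.dropWhile (fun x => pvIsLower x == false)) hrlen
        have harith : cur + (1 + ((cs'.takeWhile (fun x => pvIsLower x == false)).length : Int))
            = cur + 1 + (cs'.takeWhile (fun x => pvIsLower x == false)).length := by ring
        constructor
        · rw [pvStep3 chrom c cs' cur s e hc, (ihrest chrom _ s e).1, hrunseq]
          rw [pvBloopS, harith]
          simp
        · rw [pvStep4 chrom c cs' cur s e hc, (ihrest chrom _ s cur).1, hrunseq]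
          rw [pvBmid, pvBloopS, harith]
          simp

-- ===== VERDICT (by name: the statement is the Claim_ definition above) =====
theorem generate_softbridges_spec : Claim_equal_generate_softbridges := by
  intro gd m _
  unfold Spec_generate_softbridges generate_softbridges generate_softbridges_alt
  congr 1
  funext chrom
  have h1 := (pvMain (PySem.Dict.getD (PySem.Dict.ofList gd) chrom "").toList.length
    (PySem.Dict.getD (PySem.Dict.ofList gd) chrom "").toList le_rfl chrom 0 0 0).1
  have h2 := pvBloop_eq_S chrom
    (pvRuns (PySem.Dict.getD (PySem.Dict.ofList gd) chrom "").toList) 0 0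
  simp only [zero_add] at h2
  rw [h1, ← h2]
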